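-- pv_equiv track=rewrite | github.com/Pivi14/InRow | Functions.py | board_line_add
-- ===== SOURCE A (Python) =====
-- def board_line_add(raw_board_line, board):
--     new_board_line = []
--     for i in range(len(raw_board_line)):
--         for y in range(len(raw_board_line[i])):
--             if [] in raw_board_line[i]:
--                 raw_board_line[i][y] = []
--     for w in range(len(raw_board_line)):
--         new_board_line.append([])
--         for z in range(len(raw_board_line[w])):
--             if raw_board_line[w][z] != []:
--                 try:
--                     new_board_line[w].append(board[raw_board_line[w][z][0]][raw_board_line[w][z][1]])
--                 except:
--                     continue
--             else:
--                 continue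
--     return new_board_line
-- ===== SOURCE B (Python) =====
-- def board_line_add(raw_board_line, board):
--     new_board_line = []
--     for row in raw_board_line:
--         if [] in row:
--             for y in range(len(row)):
--                 row[y] = []
--             new_board_line.append([])
--         else:
--             mapped = []
--             for cell in row:
--                 try:
--                     mapped.append(board[cell[0]][cell[1]])
--                 except:
--                     pass
--             new_board_line.append(mapped)
--     return new_board_line
-- ===== Notes on version B (the rewrite author's own statement) =====
-- stated objective: simpler
-- what changed: Fuses A's two full passes (quadratic per-row blanking with a repeated membership test, then a rebuild pass) into one pass over the rows with a single membership test per row, appending [] directly for empty-containing rows instead of blanking cell by cell and re-scanning.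
import Mathlib
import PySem

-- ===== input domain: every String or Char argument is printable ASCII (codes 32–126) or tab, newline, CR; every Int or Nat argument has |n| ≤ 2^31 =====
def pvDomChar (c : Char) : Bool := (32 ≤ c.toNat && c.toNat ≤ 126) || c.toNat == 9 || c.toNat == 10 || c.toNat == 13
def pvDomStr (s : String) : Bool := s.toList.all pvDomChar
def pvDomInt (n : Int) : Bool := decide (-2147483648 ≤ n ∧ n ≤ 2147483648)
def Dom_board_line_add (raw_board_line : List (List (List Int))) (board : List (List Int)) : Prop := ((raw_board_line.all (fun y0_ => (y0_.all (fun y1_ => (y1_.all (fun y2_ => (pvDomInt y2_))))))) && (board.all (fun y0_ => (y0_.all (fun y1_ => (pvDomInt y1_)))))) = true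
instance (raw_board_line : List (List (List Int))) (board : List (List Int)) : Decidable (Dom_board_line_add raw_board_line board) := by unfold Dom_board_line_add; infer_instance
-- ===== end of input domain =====

-- B fuses A's two passes (blank rows containing an empty cell, then rebuild) into one
-- pass over the rows with a single membership test per row; equivalence is about the
-- RETURN value only (both Pythons also blank empty-containing rows of raw_board_line in place).

-- ===== PORT A =====
-- first pass, one row: for y in range(len(row)): if [] in row: row[y] = []
def pvBlankPassA (row : List (List Int)) : List (List Int) :=
  (List.range row.length).foldl (fun r y => if ([] : List Int) ∈ r then r.set y [] else r) row

-- body of the second pass's inner loop: the try/except append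
def pvCellStepA (board : List (List Int)) (cur : List Int) (cell : List Int) : List Int :=
  if cell ≠ [] then
    match PySem.List.pyGet? cell 0 with
    | none => cur
    | some c0 =>
      match PySem.List.pyGet? cell 1 with
      | none => cur
      | some c1 =>
        match PySem.List.pyGet? board c0 with
        | none => cur
        | some brow =>
          match PySem.List.pyGet? brow c1 with
          | none => cur
          | some v => cur ++ [v]
  else cur

def board_line_add (raw_board_line : List (List (List Int))) (board : List (List Int)) : List (List Int) :=
  let blanked := raw_board_line.map pvBlankPassA
  blanked.foldl (fun acc row => acc ++ [row.foldl (pvCellStepA board) []]) []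

-- ===== PORT B =====
-- one row of B's single pass: membership test once, then build the mapped list
def pvRowB (board : List (List Int)) (row : List (List Int)) : List Int :=
  if ([] : List Int) ∈ row then []
  else
    row.foldl (fun m cell =>
      match PySem.List.pyGet? cell 0, PySem.List.pyGet? cell 1 with
      | some c0, some c1 =>
        match PySem.List.pyGet? board c0 with
        | some brow =>
          match PySem.List.pyGet? brow c1 with
          | some v => m ++ [v]
          | none => m
        | none => m
      | _, _ => m) []

def board_line_add_alt (raw_board_line : List (List (List Int))) (board : List (List Int)) : List (List Int) :=
  raw_board_line.map (pvRowB board)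

-- ===== PRECONDITION & SPEC =====
def Spec_board_line_add (raw_board_line : List (List (List Int))) (board : List (List Int)) (out : List (List Int)) : Prop := out = board_line_add_alt raw_board_line board
instance (raw_board_line : List (List (List Int))) (board : List (List Int)) (out : List (List Int)) : Decidable (Spec_board_line_add raw_board_line board out) := by unfold Spec_board_line_add; infer_instance

-- ===== CLAIM (what is proved, stated in full; the proofs are below) =====
def Claim_equal_board_line_add : Prop := ∀ (raw_board_line : List (List (List Int))) (board : List (List Int)), Dom_board_line_add raw_board_line board → Spec_board_line_add raw_board_line board (board_line_add raw_board_line board)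

-- ===== LEMMAS AND PROOFS =====

-- A's accumulator-append fold is a map
theorem foldl_append_map {α β : Type} (g : α → β) (l : List α) (acc : List β) :
    l.foldl (fun a r => a ++ [g r]) acc = acc ++ l.map g := by
  induction l generalizing acc with
  | nil => simp
  | cons x xs ih => simp [List.foldl, ih]

-- if the row contains no [], the blanking pass is the identity
theorem blank_noop (row : List (List Int)) (h : ([] : List Int) ∉ row) :
    pvBlankPassA row = row := by
  unfold pvBlankPassA
  generalize List.range row.length = l
  induction l with
  | nil => rfl
  | cons y ys ih => simp [List.foldl, h, ih]

-- if the row contains a [], the blanking pass yields an all-[] row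
theorem blank_all (row : List (List Int)) (h : ([] : List Int) ∈ row) :
    pvBlankPassA row = List.replicate row.length [] := by
  unfold pvBlankPassA
  suffices H : ∀ n, n ≤ row.length →
      (List.range n).foldl (fun r y => if ([] : List Int) ∈ r then r.set y [] else r) row
        = List.replicate n [] ++ row.drop n by
    simpa using H row.length le_rfl
  intro n hn
  induction n with
  | zero => simp
  | succ k ih =>
    rw [List.range_succ, List.foldl_append, ih (Nat.le_of_succ_le hn)]
    have hk : k < row.length := hn
    have hmem : ([] : List Int) ∈ List.replicate k ([] : List Int) ++ row.drop k := by
      cases k with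
      | zero => simpa using h
      | succ j => simp
    have hdrop : row.drop k = row[k] :: row.drop (k + 1) :=
      (List.drop_eq_getElem_cons hk)
    simp only [List.foldl_cons, List.foldl_nil, if_pos hmem]
    rw [hdrop, List.set_append]
    have hlen : ¬ k < (List.replicate k ([] : List Int)).length := by simp
    rw [if_neg hlen]
    simp only [List.replicate_succ', List.append_assoc, List.length_replicate,
      Nat.sub_self, List.singleton_append, List.append_cancel_left_eq]
    exact List.set_cons_zero ..


-- A's rebuild of an all-[] row yields []
theorem stepA_replicate (board : List (List Int)) (n : ℕ) (acc : List Int) :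
    (List.replicate n ([] : List Int)).foldl (pvCellStepA board) acc = acc := by
  induction n generalizing acc with
  | zero => rfl
  | succ k ih => simp [List.replicate_succ, pvCellStepA, ih]

-- on any cell, A's guarded step equals B's step
theorem step_eq (board : List (List Int)) (acc : List Int) (cell : List Int) :
    pvCellStepA board acc cell =
      (match PySem.List.pyGet? cell 0, PySem.List.pyGet? cell 1 with
       | some c0, some c1 =>
         match PySem.List.pyGet? board c0 with
         | some brow =>
           match PySem.List.pyGet? brow c1 with
           | some v => acc ++ [v]
           | none => acc
         | none => acc
       | _, _ => acc) := by
  unfold pvCellStepA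
  by_cases hc : cell = []
  · subst hc; rfl
  · rw [if_pos (by simpa using hc)]
    rcases h0 : PySem.List.pyGet? cell 0 with _ | c0
    · rfl
    · rcases h1 : PySem.List.pyGet? cell 1 with _ | c1
      · rfl
      · rcases hb : PySem.List.pyGet? board c0 with _ | brow
        · simp [hb]
        · rcases hv : PySem.List.pyGet? brow c1 with _ | v <;> simp [hb, hv]

-- per-row equality: A's blank-then-rebuild equals B's fused row
theorem row_eq (board : List (List Int)) (row : List (List Int)) :
    (pvBlankPassA row).foldl (pvCellStepA board) [] = pvRowB board row := by
  unfold pvRowB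
  by_cases h : ([] : List Int) ∈ row
  · rw [if_pos h, blank_all row h, stepA_replicate]
  · rw [if_neg h, blank_noop row h]
    have : ∀ (l : List (List Int)) (acc : List Int),
      l.foldl (pvCellStepA board) acc =
        l.foldl (fun m cell =>
          match PySem.List.pyGet? cell 0, PySem.List.pyGet? cell 1 with
          | some c0, some c1 =>
            match PySem.List.pyGet? board c0 with
            | some brow =>
              match PySem.List.pyGet? brow c1 with
              | some v => m ++ [v]
              | none => m
            | none => m
          | _, _ => m) acc := by
      intro l
      induction l with
      | nil => intro acc; rfl
      | cons c cs ih =>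
        intro acc
        simp only [List.foldl_cons]
        rw [step_eq board acc c, ih]
    exact this row []

-- ===== VERDICT (by name: the statement is the Claim_ definition above) =====
theorem board_line_add_spec : Claim_equal_board_line_add := by
  intro raw board _
  show board_line_add raw board = board_line_add_alt raw board
  unfold board_line_add board_line_add_alt
  rw [foldl_append_map]
  simp only [List.nil_append, List.map_map]
  exact List.map_congr_left (fun row _ => row_eq board row)
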